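-- pv_equiv track=rewrite | github.com/Leduvanh44/labels | utils/roi_bp/roi_bp.py | get_values_around_number
-- ===== SOURCE A (Python) =====
-- def get_values_around_number(number, count):
--     values = [number]
--     offset = 1
--     for _ in range(count):
--         values.append(number + offset)
--         values.append(number - offset)
--         if number - offset < 4 or number + offset > 11:
--             break
--         offset += 1
--     return values
-- ===== SOURCE B (Python) =====
-- def get_values_around_number(number, count):
--     if count <= 0:
--         pairs = 0
--     else:
--         pairs = min(count, max(1, min(number - 3, 12 - number)))
--     out = [number]
--     for off in range(1, pairs + 1):
--         out += [number + off, number - off]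
--     return out
-- ===== Notes on version B (the rewrite author's own statement) =====
-- stated objective: simpler
-- what changed: Solves the break inequalities in closed form to get the number of offset-pairs (min(count, max(1, min(number-3, 12-number)))), then emits the pairs directly, removing the per-iteration break test.
import Mathlib
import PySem

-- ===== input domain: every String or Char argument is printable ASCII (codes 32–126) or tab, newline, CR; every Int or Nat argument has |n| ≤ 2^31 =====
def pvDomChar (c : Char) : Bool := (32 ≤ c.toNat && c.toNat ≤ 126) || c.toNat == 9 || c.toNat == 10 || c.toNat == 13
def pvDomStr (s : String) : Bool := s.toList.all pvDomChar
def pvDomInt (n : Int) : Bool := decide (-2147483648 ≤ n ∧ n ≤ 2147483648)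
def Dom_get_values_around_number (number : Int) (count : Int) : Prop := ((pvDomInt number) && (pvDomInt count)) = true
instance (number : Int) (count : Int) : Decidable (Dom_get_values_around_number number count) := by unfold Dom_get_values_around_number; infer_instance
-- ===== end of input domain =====

-- ===== PORT A =====
-- header: B computes the pair count in closed form and emits the pairs directly (simpler; not claimed faster)
-- loop of A: for _ in range(count): append number+offset, number-offset; break after append if out of [4,11]; else offset += 1
def pvGoA (number : Int) : Nat → List Int → Int → List Int
  | 0, values, _ => values
  | n + 1, values, offset =>
      let values := values ++ [number + offset, number - offset]
      if number - offset < 4 ∨ number + offset > 11 then values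
      else pvGoA number n values (offset + 1)

def get_values_around_number (number : Int) (count : Int) : List Int :=
  pvGoA number count.toNat [number] 1

-- ===== PORT B =====
def get_values_around_number_alt (number : Int) (count : Int) : List Int :=
  let pairs : Int := if count ≤ 0 then 0 else min count (max 1 (min (number - 3) (12 - number)))
  (PySem.List.pyRange 1 (pairs + 1) 1).foldl (fun out off => out ++ [number + off, number - off]) [number]

-- ===== PRECONDITION & SPEC =====
def Spec_get_values_around_number (number : Int) (count : Int) (out : List Int) : Prop := out = get_values_around_number_alt number count
instance (number : Int) (count : Int) (out : List Int) : Decidable (Spec_get_values_around_number number count out) := by unfold Spec_get_values_around_number; infer_instance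

-- ===== CLAIM (what is proved, stated in full; the proofs are below) =====
def Claim_equal_get_values_around_number : Prop := ∀ (number : Int) (count : Int), Dom_get_values_around_number number count → Spec_get_values_around_number number count (get_values_around_number number count)

-- ===== LEMMAS AND PROOFS =====

-- ===== VERDICT (by name: the statement is the Claim_ definition above) =====
-- chunk: the tail A's loop produces, same recursion without the accumulator
def pvChunk (number : Int) : Nat → Int → List Int
  | 0, _ => []
  | n + 1, o =>
      if number - o < 4 ∨ number + o > 11 then [number + o, number - o]
      else [number + o, number - o] ++ pvChunk number n (o + 1)

theorem pvGoA_eq_chunk (number : Int) : ∀ (n : Nat) (values : List Int) (o : Int),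
    pvGoA number n values o = values ++ pvChunk number n o := by
  intro n
  induction n with
  | zero => intro values o; simp [pvGoA, pvChunk]
  | succ n ih =>
    intro values o
    simp only [pvGoA, pvChunk]
    split
    · rfl
    · rw [ih]; simp

theorem pvChunk_eq_flatMap (number : Int) : ∀ (n : Nat) (o : Int), 1 ≤ n →
    pvChunk number n o =
      (PySem.List.pyRange o
        (o + min (n : Int) (max 1 (min (number - 3) (12 - number) - o + 1))) 1).flatMap
        (fun off => [number + off, number - off]) := by
  intro n
  induction n with
  | zero => intro o h; omega
  | succ n ih =>
    intro o _
    simp only [pvChunk]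
    by_cases hbr : number - o < 4 ∨ number + o > 11
    · have hq : o + min ((n : Int) + 1) (max 1 (min (number - 3) (12 - number) - o + 1)) = o + 1 := by
        omega
      rw [if_pos hbr]
      push_cast
      rw [hq, PySem.List.pyRange_one_singleton]
      simp
    · rw [if_neg hbr]
      rcases Nat.eq_zero_or_pos n with hn | hn
      · subst hn
        have hq : o + min (1 : Int) (max 1 (min (number - 3) (12 - number) - o + 1)) = o + 1 := by
          omega
        push_cast
        rw [hq, PySem.List.pyRange_one_singleton]
        simp [pvChunk]
      · rw [ih (o + 1) hn]
        have hq : o + min ((n : Int) + 1) (max 1 (min (number - 3) (12 - number) - o + 1))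
            = o + 1 + min (n : Int) (max 1 (min (number - 3) (12 - number) - (o + 1) + 1)) := by
          omega
        push_cast
        push_cast at hq
        rw [hq]
        rw [PySem.List.pyRange_one_cons (by omega : o < o + 1 + min (n : Int) (max 1 (min (number - 3) (12 - number) - (o + 1) + 1)))]
        simp

theorem get_values_around_number_spec : Claim_equal_get_values_around_number := by
  intro number count _
  unfold Spec_get_values_around_number get_values_around_number get_values_around_number_alt
  rw [PySem.List.foldl_append_eq_flatMap]
  by_cases hc : count ≤ 0
  · have h0 : count.toNat = 0 := by omega
    rw [h0, if_pos hc]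
    simp [pvGoA]
  · have h1 : 1 ≤ count.toNat := by omega
    rw [pvGoA_eq_chunk, pvChunk_eq_flatMap number count.toNat 1 h1, if_neg hc]
    have : (1 : Int) + min ((count.toNat : Int)) (max 1 (min (number - 3) (12 - number) - 1 + 1))
        = min count (max 1 (min (number - 3) (12 - number))) + 1 := by omega
    rw [this]
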